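-- pv_equiv track=rewrite | github.com/alehpineda/bitesofpy | 225/convert_chars.py | convert_pybites_chars1
-- ===== SOURCE A (Python) =====
-- PYBITES = "pybites"
--
-- def convert_pybites_chars1(text):
--    """Swap case all characters in the word pybites for the given text.
--       Return the resulting string."""
--    swap_case = []
--    for char in text:
--       if char.lower() in PYBITES:
--          swap_case.append(char.swapcase())
--       else:
--          swap_case.append(char)
--
--    return "".join(swap_case)
-- ===== SOURCE B (Python) =====
-- PYBITES = "pybites"
--
--
-- def convert_pybites_chars1(text):
--     """Swap case all characters in the word pybites for the given text.
--        Return the resulting string."""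
--     # Letter-major: one staged pass over the text per pybites letter,
--     # flipping both cases of that letter (positions keyed on the original text).
--     out = list(text)
--     for lower in PYBITES:
--         upper = lower.upper()
--         out = [upper if c == lower else (lower if c == upper else o)
--                for c, o in zip(text, out)]
--     return "".join(out)
-- ===== Notes on version B (the rewrite author's own statement) =====
-- stated objective: alternative
-- what changed: Letter-major instead of char-major: B makes one staged pass over the text per pybites letter (7 passes), each flipping both cases of that letter by zipping with the original text, instead of A's single loop with a per-character substring membership test and swapcase.
import Mathlib
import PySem

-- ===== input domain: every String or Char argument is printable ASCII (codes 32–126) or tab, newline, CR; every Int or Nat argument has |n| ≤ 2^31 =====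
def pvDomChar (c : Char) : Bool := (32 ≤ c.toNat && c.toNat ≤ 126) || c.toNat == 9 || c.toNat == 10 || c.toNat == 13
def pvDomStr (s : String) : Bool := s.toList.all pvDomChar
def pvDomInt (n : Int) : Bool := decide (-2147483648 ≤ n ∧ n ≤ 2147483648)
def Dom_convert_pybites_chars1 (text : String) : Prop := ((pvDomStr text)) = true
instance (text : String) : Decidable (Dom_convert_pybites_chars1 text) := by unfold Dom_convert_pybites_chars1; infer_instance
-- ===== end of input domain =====

-- B is letter-major: one staged pass over the text per pybites letter (zip with the original
-- text, flipping both cases of that letter), instead of A's char-major loop with a membership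
-- test and swapcase (alternative decomposition, same cost).


-- ===== PORT A =====
-- str.swapcase on a single char, ported by hand (exact on the ASCII domain)
def pySwapcaseChar (c : Char) : Char :=
  if PySem.Chars.isupper c then PySem.Chars.lowerChar c
  else if PySem.Chars.islower c then PySem.Chars.upperChar c
  else c

def PYBITES : String := "pybites"

def convert_pybites_chars1 (text : String) : String :=
  let swap_case : List Char :=
    text.toList.foldl (fun acc char =>
      if PySem.Chars.isIn [PySem.Chars.lowerChar char] PYBITES.toList then
        acc ++ [pySwapcaseChar char]
      else
        acc ++ [char]) []
  String.ofList swap_case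

-- ===== PORT B =====
-- out = list(text); for lower in PYBITES: out = [upper if c == lower else (lower if c == upper
-- else o) for c, o in zip(text, out)]; return "".join(out)
def convert_pybites_chars1_alt (text : String) : String :=
  let out : List Char := text.toList
  let out : List Char :=
    PYBITES.toList.foldl (fun out lower =>
      let upper := PySem.Chars.upperChar lower
      (text.toList.zip out).map (fun p =>
        if p.1 = lower then upper else if p.1 = upper then lower else p.2)) out
  String.ofList out

-- ===== PRECONDITION & SPEC =====
def Spec_convert_pybites_chars1 (text : String) (out : String) : Prop := out = convert_pybites_chars1_alt text
instance (text : String) (out : String) : Decidable (Spec_convert_pybites_chars1 text out) := by unfold Spec_convert_pybites_chars1; infer_instance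

-- ===== CLAIM (what is proved, stated in full; the proofs are below) =====
def Claim_equal_convert_pybites_chars1 : Prop := ∀ (text : String), Dom_convert_pybites_chars1 text → Spec_convert_pybites_chars1 text (convert_pybites_chars1 text)

-- ===== LEMMAS AND PROOFS =====

-- zipping a list with a map of itself and mapping is a single map
theorem pvZipMap (l : List Char) (h : Char → Char) (f : Char × Char → Char) :
    ((l.zip (l.map h)).map f) = l.map (fun c => f (c, h c)) := by
  induction l with
  | nil => rfl
  | cons a t ih => simp [ih]

-- B's per-character effect of the whole letter fold, as a function of the original char
def pvBStep (Ls : List Char) (c : Char) : Char :=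
  Ls.foldl (fun o lower =>
    if c = lower then PySem.Chars.upperChar lower
    else if c = PySem.Chars.upperChar lower then lower else o) c

-- B's staged passes equal a single pointwise map
theorem pvAltFold (text : List Char) (Ls : List Char) (h : Char → Char) :
    Ls.foldl (fun out lower =>
        (text.zip out).map (fun p =>
          if p.1 = lower then PySem.Chars.upperChar lower
          else if p.1 = PySem.Chars.upperChar lower then lower else p.2)) (text.map h)
      = text.map (fun c =>
          Ls.foldl (fun o lower =>
            if c = lower then PySem.Chars.upperChar lower
            else if c = PySem.Chars.upperChar lower then lower else o) (h c)) := by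
  induction Ls generalizing h with
  | nil => rfl
  | cons L Ls ih =>
    simp only [List.foldl_cons]
    rw [pvZipMap text h, ih]

-- the per-character step of A equals B's per-character effect, for every domain char
def pvStepEq (c : Char) : Bool :=
  (if PySem.Chars.isIn [PySem.Chars.lowerChar c] PYBITES.toList then pySwapcaseChar c else c)
    == pvBStep PYBITES.toList c

set_option maxRecDepth 8000 in
theorem pvStepEq_all : ∀ n, n < 128 → pvStepEq (Char.ofNat n) = true := by decide

theorem pvStepEq_dom (c : Char) (h : pvDomChar c = true) :
    (if PySem.Chars.isIn [PySem.Chars.lowerChar c] PYBITES.toList then pySwapcaseChar c else c)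
      = pvBStep PYBITES.toList c := by
  have hlt : c.toNat < 128 := by
    simp [pvDomChar, Bool.or_eq_true, Bool.and_eq_true, decide_eq_true_eq] at h
    omega
  have hc : Char.ofNat c.toNat = c := Char.ofNat_toNat c
  have := pvStepEq_all c.toNat hlt
  rw [hc] at this
  simpa [pvStepEq] using this

theorem convert_pybites_chars1_eq (text : String) (h : Dom_convert_pybites_chars1 text) :
    convert_pybites_chars1 text = convert_pybites_chars1_alt text := by
  unfold convert_pybites_chars1 convert_pybites_chars1_alt
  -- A's append fold is a map
  have hfoldA :
      text.toList.foldl (fun acc char =>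
        if PySem.Chars.isIn [PySem.Chars.lowerChar char] PYBITES.toList then
          acc ++ [pySwapcaseChar char]
        else
          acc ++ [char]) []
      = text.toList.map (fun c =>
          if PySem.Chars.isIn [PySem.Chars.lowerChar c] PYBITES.toList then pySwapcaseChar c else c) := by
    have hbody :
        text.toList.foldl (fun acc char =>
          if PySem.Chars.isIn [PySem.Chars.lowerChar char] PYBITES.toList then
            acc ++ [pySwapcaseChar char]
          else
            acc ++ [char]) []
        = text.toList.foldl (fun acc char =>
            acc ++ [if PySem.Chars.isIn [PySem.Chars.lowerChar char] PYBITES.toList then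
              pySwapcaseChar char else char]) [] := by
      apply PySem.List.foldl_congr_mem
      intro acc char _
      split <;> rfl
    rw [hbody, PySem.List.foldl_append_singleton_eq_map]
    simp
  -- B's staged passes are a map (start state text.toList = text.toList.map id)
  have hB :
      PYBITES.toList.foldl (fun out lower =>
          (text.toList.zip out).map (fun p =>
            if p.1 = lower then PySem.Chars.upperChar lower
            else if p.1 = PySem.Chars.upperChar lower then lower else p.2)) text.toList
        = text.toList.map (pvBStep PYBITES.toList) := by
    have h0 := pvAltFold text.toList PYBITES.toList id
    simpa [pvBStep] using h0
  rw [hfoldA]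
  show String.ofList _ =
    String.ofList (PYBITES.toList.foldl (fun out lower =>
        (text.toList.zip out).map (fun p =>
          if p.1 = lower then PySem.Chars.upperChar lower
          else if p.1 = PySem.Chars.upperChar lower then lower else p.2)) text.toList)
  rw [hB]
  congr 1
  apply List.map_congr_left
  intro c hc
  have hdc : pvDomChar c = true := by
    have := h
    unfold Dom_convert_pybites_chars1 pvDomStr at this
    exact (List.all_eq_true.mp this) c hc
  simpa [pvBStep] using pvStepEq_dom c hdc

-- ===== VERDICT (by name: the statement is the Claim_ definition above) =====
theorem convert_pybites_chars1_spec : Claim_equal_convert_pybites_chars1 := by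
  intro text h
  unfold Spec_convert_pybites_chars1
  exact convert_pybites_chars1_eq text h
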